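-- pv_equiv track=rewrite | github.com/lautarodelosheros/TDA_tp3 | Parte1/Estrategia Real/Seleccion/estrategia_1.py | obtener_ciudades_que_mas_producen
-- ===== SOURCE A (Python) =====
-- def obtener_ciudades_que_mas_producen(diccionario_especias, lista_metropolis):
--     diccionario_auxiliar = {}
--
--     for ciudad in diccionario_especias:
--
--         if ciudad in lista_metropolis: continue
--
--         cantidad_producida = diccionario_especias[ciudad]
--
--         if cantidad_producida not in diccionario_auxiliar:
--             lista_ciudades = []
--             lista_ciudades.append(ciudad)
--             diccionario_auxiliar[cantidad_producida] = lista_ciudades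
--
--         else:
--             lista_ciudades = diccionario_auxiliar[cantidad_producida]
--             lista_ciudades.append(ciudad)
--
--     lista_cantidades_producidas = list( diccionario_auxiliar.keys() )
--     lista_cantidades_producidas.sort()
--     lista_cantidades_producidas.reverse()
--     lista_ciudades_priorizadas = []
--
--     for cantidad_producida in lista_cantidades_producidas:
--         lista_ciudades = diccionario_auxiliar[cantidad_producida]
--
--         for ciudad in lista_ciudades:
--             lista_ciudades_priorizadas.append(ciudad)
--
--     return lista_ciudades_priorizadas
-- ===== SOURCE B (Python) =====
-- def obtener_ciudades_que_mas_producen(diccionario_especias, lista_metropolis):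
--     metropolis = set(lista_metropolis)
--     ciudades = [c for c in diccionario_especias if c not in metropolis]
--     ciudades.sort(key=lambda c: diccionario_especias[c], reverse=True)
--     return ciudades
-- ===== Notes on version B (the rewrite author's own statement) =====
-- stated objective: faster
-- what changed: B drops A's production-value->cities bucket dictionary and its sort-distinct-values-then-expand double loop: it filters out metropolis via a set (O(1) membership instead of A's O(m) list scan per city) and does one stable reverse sort of the non-metropolis cities keyed by their production.
import Mathlib
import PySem

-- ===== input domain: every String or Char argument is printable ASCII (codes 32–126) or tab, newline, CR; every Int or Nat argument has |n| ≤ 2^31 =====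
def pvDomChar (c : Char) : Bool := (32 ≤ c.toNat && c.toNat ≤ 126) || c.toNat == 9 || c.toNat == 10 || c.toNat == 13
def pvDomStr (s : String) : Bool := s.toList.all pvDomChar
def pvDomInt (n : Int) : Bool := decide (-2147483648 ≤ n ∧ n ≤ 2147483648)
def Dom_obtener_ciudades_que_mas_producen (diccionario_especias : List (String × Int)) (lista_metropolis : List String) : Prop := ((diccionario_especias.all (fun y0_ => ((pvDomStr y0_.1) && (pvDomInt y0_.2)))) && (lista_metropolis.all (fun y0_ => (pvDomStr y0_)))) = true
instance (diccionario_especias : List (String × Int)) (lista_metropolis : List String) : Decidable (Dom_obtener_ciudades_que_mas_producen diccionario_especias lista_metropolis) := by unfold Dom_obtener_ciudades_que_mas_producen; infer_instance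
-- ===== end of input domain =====

-- B replaces A's value→cities bucket dictionary and its sort-keys-then-expand double loop by one stable
-- reverse sort of the non-metropolis cities, excluded via a set instead of A's per-city list scan (faster, measured).

-- ===== PORT A =====
def obtener_ciudades_que_mas_producen (diccionario_especias : List (String × Int)) (lista_metropolis : List String) : List String :=
  let d := PySem.Dict.ofList diccionario_especias
  let diccionario_auxiliar : PySem.Dict Int (List String) :=
    d.keys.foldl (fun aux ciudad =>
      if lista_metropolis.contains ciudad then aux
      else
        let cantidad_producida := d.getD ciudad 0
        if aux.contains cantidad_producida = false then
          aux.insert cantidad_producida [ciudad]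
        else
          aux.insert cantidad_producida (aux.getD cantidad_producida [] ++ [ciudad]))
      PySem.Dict.empty
  let lista_cantidades_producidas := (PySem.List.sorted diccionario_auxiliar.keys (fun x => x) false).reverse
  lista_cantidades_producidas.foldl (fun acc cantidad =>
    (diccionario_auxiliar.getD cantidad []).foldl (fun a ciudad => a ++ [ciudad]) acc) []

-- ===== PORT B =====
def obtener_ciudades_que_mas_producen_alt (diccionario_especias : List (String × Int)) (lista_metropolis : List String) : List String :=
  let d := PySem.Dict.ofList diccionario_especias
  let metropolis := PySem.Set.ofList lista_metropolis
  let ciudades := d.keys.filter (fun c => !(metropolis.contains c))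
  PySem.List.sorted ciudades (fun c => d.getD c 0) true

-- ===== PRECONDITION & SPEC =====
def Spec_obtener_ciudades_que_mas_producen (diccionario_especias : List (String × Int)) (lista_metropolis : List String) (out : List String) : Prop := out = obtener_ciudades_que_mas_producen_alt diccionario_especias lista_metropolis
instance (diccionario_especias : List (String × Int)) (lista_metropolis : List String) (out : List String) : Decidable (Spec_obtener_ciudades_que_mas_producen diccionario_especias lista_metropolis out) := by unfold Spec_obtener_ciudades_que_mas_producen; infer_instance

-- ===== CLAIM (what is proved, stated in full; the proofs are below) =====
def Claim_equal_obtener_ciudades_que_mas_producen : Prop := ∀ (diccionario_especias : List (String × Int)) (lista_metropolis : List String), Dom_obtener_ciudades_que_mas_producen diccionario_especias lista_metropolis → Spec_obtener_ciudades_que_mas_producen diccionario_especias lista_metropolis (obtener_ciudades_que_mas_producen diccionario_especias lista_metropolis)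

-- ===== LEMMAS AND PROOFS =====

-- a fold that skips elements satisfying p is a fold over the filtered list
theorem foldl_skip_if {α β : Type} (p : α → Bool) (g : β → α → β) :
    ∀ (l : List α) (acc : β),
      l.foldl (fun s x => if p x then s else g s x) acc
        = (l.filter (fun x => !(p x))).foldl g acc := by
  intro l
  induction l with
  | nil => intro acc; rfl
  | cons x xs ih =>
    intro acc
    by_cases h : p x = true <;> simp [h, ih]

-- A's two if/else branches are exactly Dict.modify
theorem branch_eq_modify (aux : PySem.Dict Int (List String)) (v : Int) (c : String) :
    (if aux.contains v = false then aux.insert v [c]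
     else aux.insert v (aux.getD v [] ++ [c]))
      = aux.modify v [] (· ++ [c]) := by
  by_cases h : aux.contains v = true
  · simp [h, PySem.Dict.modify]
  · simp only [Bool.not_eq_true] at h
    rw [if_pos h, PySem.Dict.modify, PySem.Dict.getD_of_not_contains _ _ h, List.nil_append]

-- insertion of a value into a strictly descending list of distinct values
def insDesc (v : Int) : List Int → List Int
  | [] => [v]
  | u :: us => if u < v then v :: u :: us else if u = v then u :: us else u :: insDesc v us

theorem mem_insDesc (v x : Int) : ∀ ds : List Int, x ∈ insDesc v ds ↔ x = v ∨ x ∈ ds := by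
  intro ds
  induction ds with
  | nil => simp [insDesc]
  | cons u us ih =>
    by_cases h1 : u < v
    · simp [insDesc, h1]
    · by_cases h2 : u = v
      · subst h2; simp [insDesc]
      · simp [insDesc, h1, h2, ih]
        tauto

theorem pairwise_insDesc (v : Int) : ∀ ds : List Int,
    ds.Pairwise (fun a b => b < a) → (insDesc v ds).Pairwise (fun a b => b < a) := by
  intro ds
  induction ds with
  | nil => intro _; simp [insDesc]
  | cons u us ih =>
    intro hp
    rw [List.pairwise_cons] at hp
    obtain ⟨hu, hus⟩ := hp
    by_cases h1 : u < v
    · simp only [insDesc, if_pos h1]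
      refine List.Pairwise.cons ?_ (List.Pairwise.cons hu hus)
      intro b hb
      rcases List.mem_cons.mp hb with rfl | hb
      · exact h1
      · exact lt_trans (hu b hb) h1
    · by_cases h2 : u = v
      · simp only [insDesc, if_neg h1, if_pos h2]
        exact List.Pairwise.cons hu hus
      · simp only [insDesc, if_neg h1, if_neg h2]
        refine List.Pairwise.cons ?_ (ih hus)
        intro b hb
        rcases (mem_insDesc v b us).mp hb with rfl | hb
        · omega
        · exact hu b hb

theorem insertBy_cons {α : Type} (before : α → α → Bool) (x y : α) (ys : List α) :
    PySem.List.insertBy before x (y :: ys)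
      = if before x y then x :: y :: ys else y :: PySem.List.insertBy before x ys := rfl

-- insertBy skips a block of elements it does not go before
theorem insertBy_append_left {α : Type} (before : α → α → Bool) (x : α) :
    ∀ (l t : List α), (∀ y ∈ l, before x y = false) →
      PySem.List.insertBy before x (l ++ t) = l ++ PySem.List.insertBy before x t := by
  intro l
  induction l with
  | nil => intro t _; rfl
  | cons y ys ih =>
    intro t h
    have hy : before x y = false := h y (List.mem_cons_self ..)
    rw [List.cons_append, insertBy_cons, if_neg (by simp [hy]),
      ih t (fun z hz => h z (List.mem_cons_of_mem _ hz)), List.cons_append]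

theorem insertBy_all_before {α : Type} (before : α → α → Bool) (x : α) :
    ∀ t : List α, (∀ y ∈ t, before x y = true) →
      PySem.List.insertBy before x t = x :: t := by
  intro t h
  cases t with
  | nil => rfl
  | cons a t' => rw [insertBy_cons, if_pos (h a (List.mem_cons_self ..))]

theorem flatMap_congr' {α β : Type} (l : List α) (f g : α → List β)
    (h : ∀ a ∈ l, f a = g a) : l.flatMap f = l.flatMap g := by
  induction l with
  | nil => rfl
  | cons a l ih =>
    simp only [List.flatMap_cons]
    rw [h a (List.mem_cons_self ..), ih (fun b hb => h b (List.mem_cons_of_mem _ hb))]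

-- THE STEP: inserting one city into a bucket-grouped strictly descending list
theorem insertBy_grouped (k : String → Int) (c : String) :
    ∀ (ds : List Int) (b : Int → List String),
      ds.Pairwise (fun a b => b < a) →
      (∀ v ∈ ds, ∀ x ∈ b v, k x = v) →
      (∀ v ∈ ds, b v ≠ []) →
      (k c ∉ ds → b (k c) = []) →
      PySem.List.insertBy (fun a b => decide (k b < k a)) c (ds.flatMap b)
        = (insDesc (k c) ds).flatMap (fun v => if v = k c then b v ++ [c] else b v) := by
  intro ds
  induction ds with
  | nil =>
    intro b _ _ _ hout
    simp [insDesc, PySem.List.insertBy, hout]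
  | cons u us ih =>
    intro b hpw hb hne hout
    rw [List.pairwise_cons] at hpw
    obtain ⟨hu, hus⟩ := hpw
    have hbu : ∀ x ∈ b u, k x = u := hb u (List.mem_cons_self ..)
    by_cases h1 : u < k c
    · -- new maximal value: c goes first
      have hnotin : k c ∉ u :: us := by
        intro hmem
        rcases List.mem_cons.mp hmem with rfl | hmem
        · omega
        · have := hu _ hmem; omega
      have hb0 : b (k c) = [] := hout hnotin
      obtain ⟨y, ys, hy⟩ : ∃ y ys, b u = y :: ys := by
        cases hbu' : b u with
        | nil => exact absurd hbu' (hne u (List.mem_cons_self ..))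
        | cons y ys => exact ⟨y, ys, rfl⟩
      have hky : k y = u := hbu y (by rw [hy]; exact List.mem_cons_self ..)
      rw [List.flatMap_cons, hy]
      rw [show (y :: ys) ++ List.flatMap b us = y :: (ys ++ List.flatMap b us) from rfl]
      rw [insertBy_cons, if_pos (by simp [hky, h1])]
      simp only [insDesc, if_pos h1, List.flatMap_cons, hb0, List.nil_append,
        if_neg (show u ≠ k c by omega)]
      rw [flatMap_congr' us (fun v => if v = k c then b v ++ [c] else b v) (fun v => b v) ?_]
      · simp [hy]
      · intro v hv
        have : v < u := hu v hv
        have hvne : v ≠ k c := by omega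
        simp [hvne]
    · by_cases h2 : u = k c
      · -- c joins the bucket of its own value, at its end
        rw [List.flatMap_cons, insertBy_append_left _ _ _ _ ?_, insertBy_all_before _ _ _ ?_]
        · simp only [insDesc, if_neg h1, List.flatMap_cons, if_pos h2]
          rw [flatMap_congr' us (fun v => if v = k c then b v ++ [c] else b v) (fun v => b v) ?_]
          · simp
          · intro v hv
            have : v < u := hu v hv
            have hvne : v ≠ k c := by omega
            simp [hvne]
        · -- everything after bucket u has key < u
          intro y hy
          rw [List.mem_flatMap] at hy
          obtain ⟨v, hv, hyv⟩ := hy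
          have hkv : k y = v := hb v (List.mem_cons_of_mem _ hv) y hyv
          have hvu : v < u := hu v hv
          simp [hkv]; omega
        · intro y hy
          have hky : k y = u := hbu y hy
          simp [hky]; omega
      · -- c's value is smaller than u: skip bucket u and recurse
        have hgt : k c < u := by omega
        rw [List.flatMap_cons, insertBy_append_left _ _ _ _ ?_]
        · rw [ih b hus (fun v hv => hb v (List.mem_cons_of_mem _ hv))
              (fun v hv => hne v (List.mem_cons_of_mem _ hv)) ?_]
          · simp only [insDesc, if_neg h1, List.flatMap_cons, if_neg h2]
          · intro hnot
            exact hout (by simp [hnot]; omega)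
        · intro y hy
          have hky : k y = u := hbu y hy
          simp [hky]; omega

-- membership in the folded insDesc accumulator
theorem mem_foldl_insDesc (k : String → Int) (x : Int) :
    ∀ (cs : List String) (ds0 : List Int),
      (x ∈ cs.foldl (fun ds c => insDesc (k c) ds) ds0 ↔ x ∈ ds0 ∨ x ∈ cs.map k) := by
  intro cs
  induction cs with
  | nil => simp
  | cons c cs ih =>
    intro ds0
    simp only [List.foldl_cons, ih, mem_insDesc, List.map_cons, List.mem_cons]
    tauto

theorem pairwise_foldl_insDesc (k : String → Int) :
    ∀ (cs : List String) (ds0 : List Int), ds0.Pairwise (fun a b => b < a) →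
      (cs.foldl (fun ds c => insDesc (k c) ds) ds0).Pairwise (fun a b => b < a) := by
  intro cs
  induction cs with
  | nil => intro ds0 h; exact h
  | cons c cs ih => intro ds0 h; exact ih _ (pairwise_insDesc _ _ h)

-- the stable reverse sort is the grouped expansion over the insDesc accumulator
theorem sortedRev_eq_group (k : String → Int) (cs : List String) :
    PySem.List.sorted cs k true
      = (cs.foldl (fun ds c => insDesc (k c) ds) []).flatMap
          (fun v => cs.filter (fun c => k c == v)) := by
  rw [PySem.List.sorted_rev_eq_foldl_insertBy]
  induction cs using List.reverseRecOn with
  | nil => rfl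
  | append_singleton cs c ih =>
    rw [List.foldl_append, List.foldl_cons, List.foldl_nil, ih]
    rw [insertBy_grouped k c _ _ (pairwise_foldl_insDesc k cs [] (by simp))
        ?_ ?_ ?_]
    · rw [List.foldl_append, List.foldl_cons, List.foldl_nil]
      apply flatMap_congr'
      intro v hv
      by_cases h : v = k c
      · subst h
        simp [List.filter_append]
      · simp only [if_neg h, List.filter_append, List.filter_cons]
        have : ¬ (k c == v) = true := by simpa using (fun e => h e.symm)
        simp [this]
    · intro v hv x hx
      have := List.mem_filter.mp hx
      simpa using this.2
    · intro v hv
      rw [mem_foldl_insDesc] at hv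
      simp only [List.mem_map] at hv
      rcases hv with h | ⟨x, hx, rfl⟩
      · simp at h
      · intro hnil
        rw [List.filter_eq_nil_iff] at hnil
        exact absurd (by simp) (hnil x hx)
    · intro hnot
      rw [mem_foldl_insDesc] at hnot
      rw [List.filter_eq_nil_iff]
      intro x hx
      simp only [beq_iff_eq]
      intro he
      exact hnot (Or.inr (List.mem_map.mpr ⟨x, hx, he⟩))

-- two strictly descending lists with the same members are equal
theorem eq_of_pairwise_gt_of_mem_iff :
    ∀ (l₁ l₂ : List Int), l₁.Pairwise (fun a b => b < a) → l₂.Pairwise (fun a b => b < a) →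
      (∀ x, x ∈ l₁ ↔ x ∈ l₂) → l₁ = l₂ := by
  intro l₁
  induction l₁ with
  | nil =>
    intro l₂ _ _ h
    cases l₂ with
    | nil => rfl
    | cons b t => exact absurd ((h b).mpr (List.mem_cons_self ..)) (by simp)
  | cons a t₁ ih =>
    intro l₂ h₁ h₂ h
    cases l₂ with
    | nil => exact absurd ((h a).mp (List.mem_cons_self ..)) (by simp)
    | cons b t₂ =>
      rw [List.pairwise_cons] at h₁ h₂
      have hab : a = b := by
        have ha : a ∈ b :: t₂ := (h a).mp (List.mem_cons_self ..)
        have hb : b ∈ a :: t₁ := (h b).mpr (List.mem_cons_self ..)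
        rcases List.mem_cons.mp ha with rfl | ha
        · rfl
        · rcases List.mem_cons.mp hb with rfl | hb
          · rfl
          · have := h₁.1 b hb
            have := h₂.1 a ha
            omega
      subst hab
      have ht : ∀ x, x ∈ t₁ ↔ x ∈ t₂ := by
        intro x
        constructor
        · intro hx
          have := (h x).mp (List.mem_cons_of_mem _ hx)
          rcases List.mem_cons.mp this with rfl | h' 
          · exact absurd (h₁.1 x hx) (by omega)
          · exact h'
        · intro hx
          have := (h x).mpr (List.mem_cons_of_mem _ hx)
          rcases List.mem_cons.mp this with rfl | h'
          · exact absurd (h₂.1 x hx) (by omega)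
          · exact h'
      rw [ih t₂ h₁.2 h₂.2 ht]

-- ===== VERDICT (by name: the statement is the Claim_ definition above) =====
theorem obtener_ciudades_que_mas_producen_spec : Claim_equal_obtener_ciudades_que_mas_producen := by
  intro de lm _
  unfold Spec_obtener_ciudades_que_mas_producen
  unfold obtener_ciudades_que_mas_producen obtener_ciudades_que_mas_producen_alt
  dsimp only
  -- shared notation
  rw [List.filter_congr (l := (PySem.Dict.ofList de).keys)
      (q := fun c => !(lm.contains c))
      (fun c _ => by
        simp only [Bool.not_inj_iff]
        rw [Bool.eq_iff_iff]
        simp [PySem.Set.mem_ofList])]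
  rw [sortedRev_eq_group]
  generalize PySem.Dict.ofList de = d
  have hskip :
      List.foldl
        (fun aux ciudad =>
          if lm.contains ciudad = true then aux
          else
            if aux.contains (d.getD ciudad 0) = false then
              aux.insert (d.getD ciudad 0) [ciudad]
            else
              aux.insert (d.getD ciudad 0) (aux.getD (d.getD ciudad 0) [] ++ [ciudad]))
        PySem.Dict.empty d.keys
      = List.foldl
          (fun aux ciudad =>
            if aux.contains (d.getD ciudad 0) = false then
              aux.insert (d.getD ciudad 0) [ciudad]
            else
              aux.insert (d.getD ciudad 0) (aux.getD (d.getD ciudad 0) [] ++ [ciudad]))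
          PySem.Dict.empty (d.keys.filter (fun c => !(lm.contains c))) :=
    foldl_skip_if _ _ _ _
  rw [hskip]
  generalize List.filter (fun c => !lm.contains c) d.keys = cs
  have hstep : ∀ (aux : PySem.Dict Int (List String)) (c : String),
      (if aux.contains (d.getD c 0) = false then
        aux.insert (d.getD c 0) [c]
      else
        aux.insert (d.getD c 0) (aux.getD (d.getD c 0) [] ++ [c]))
        = aux.modify (d.getD c 0) [] (· ++ [c]) :=
    fun aux c => branch_eq_modify aux (d.getD c 0) c
  simp only [hstep]
  have hgetD : ∀ v : Int,
      (cs.foldl (fun a c => a.modify (d.getD c 0) [] (· ++ [c])) PySem.Dict.empty).getD v []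
        = cs.filter (fun c => d.getD c 0 == v) := by
    intro v
    have h1 : cs.foldl (fun a c => a.modify (d.getD c 0) [] (· ++ [c])) PySem.Dict.empty
        = (cs.map (fun c => (d.getD c 0, c))).foldl
            (fun a p => a.modify p.1 [] (· ++ [p.2])) PySem.Dict.empty := by
      rw [List.foldl_map]
    rw [h1, PySem.Dict.getD_foldl_modify_append]
    simp [List.filter_map, List.map_map, Function.comp_def]
  have hkeys :
      (cs.foldl (fun a c => a.modify (d.getD c 0) [] (· ++ [c])) PySem.Dict.empty).keys
        = PySem.Set.ofList (cs.map (fun c => d.getD c 0)) := by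
    have h2 := PySem.Dict.keys_foldl_modify_key cs (fun c => d.getD c 0) []
      (fun _ c => (· ++ [c])) PySem.Dict.empty
    simpa using h2
  simp only [hgetD, PySem.List.foldl_append_singleton]
  rw [PySem.List.foldl_append_eq_flatMap (fun v => cs.filter (fun c => d.getD c 0 == v))]
  rw [List.nil_append]
  have hlist :
      (PySem.List.sorted
          (cs.foldl (fun a c => a.modify (d.getD c 0) [] (· ++ [c])) PySem.Dict.empty).keys
          (fun x => x) false).reverse
        = cs.foldl (fun ds c => insDesc (d.getD c 0) ds) [] := by
    apply eq_of_pairwise_gt_of_mem_iff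
    · rw [List.pairwise_reverse, hkeys]
      exact PySem.List.sorted_ofList_pairwise_lt _
    · exact pairwise_foldl_insDesc _ cs [] (by simp)
    · intro x
      rw [List.mem_reverse, PySem.List.mem_sorted, hkeys, PySem.Set.mem_ofList,
        mem_foldl_insDesc]
      simp
  rw [hlist]
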